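-- pv_equiv track=rewrite | github.com/sydches/yuj_temp | tests/context_strategies/_working_set_baseline.py | _fit_lines
-- ===== SOURCE A (Python) =====
-- def _fit_lines(lines: list[str], max_chars: int, max_lines: int | None = None) -> str:
--     if not lines or max_chars <= 0:
--         return ""
--     chosen = lines[-max_lines:] if max_lines else lines
--     kept_rev: list[str] = []
--     used = 0
--     for line in reversed(chosen):
--         add = len(line) + (1 if kept_rev else 0)
--         if used + add > max_chars and kept_rev:
--             break
--         kept_rev.append(line)
--         used += add
--     return "\n".join(reversed(kept_rev))
-- ===== SOURCE B (Python) =====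
-- def _fit_lines(lines: list[str], max_chars: int, max_lines: int | None = None) -> str:
--     if not lines or max_chars <= 0:
--         return ""
--     chosen = lines[-max_lines:] if max_lines else lines
--     n = len(chosen)
--     if n == 0:
--         return ""
--     # costs[i] = exact character count of "\n".join(chosen[i:])
--     costs = []
--     total = -1
--     for line in reversed(chosen):
--         total += len(line) + 1
--         costs.append(total)
--     costs.reverse()
--     # earliest start whose tail fits; keep at least the last line
--     start = next((i for i, c in enumerate(costs) if c <= max_chars), n - 1)
--     return "\n".join(chosen[start:])
-- ===== Notes on version B (the rewrite author's own statement) =====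
-- stated objective: alternative
-- what changed: Instead of A's single reverse scan that accumulates used characters and breaks, B first builds a table of exact character costs of every trailing join, then picks the earliest start index whose tail fits (defaulting to keeping just the last line) and slices once.
import Mathlib
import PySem

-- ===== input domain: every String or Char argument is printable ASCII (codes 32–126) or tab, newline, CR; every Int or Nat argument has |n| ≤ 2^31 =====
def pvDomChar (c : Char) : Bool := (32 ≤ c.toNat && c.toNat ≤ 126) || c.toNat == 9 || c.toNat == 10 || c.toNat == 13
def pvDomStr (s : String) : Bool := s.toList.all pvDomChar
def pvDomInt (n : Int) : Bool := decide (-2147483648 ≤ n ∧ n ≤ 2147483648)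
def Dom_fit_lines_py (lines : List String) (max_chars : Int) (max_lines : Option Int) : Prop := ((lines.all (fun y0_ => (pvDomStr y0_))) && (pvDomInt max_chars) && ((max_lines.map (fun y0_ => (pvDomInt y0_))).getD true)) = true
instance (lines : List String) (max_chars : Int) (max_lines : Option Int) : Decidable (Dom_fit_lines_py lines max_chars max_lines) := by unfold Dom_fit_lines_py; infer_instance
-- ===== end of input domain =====

-- B keeps the same result by a different decomposition: a cost table of the trailing joins plus a
-- first-fit search, instead of A's accumulate-and-break reverse scan (objective: alternative).

-- ===== PORT A =====
-- the 'for line in reversed(chosen)' loop: state = (kept_rev, used); 'break' = returning kept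
def fitA_loop (mc : Int) : List String → List String → Int → List String
  | [], kept, _used => kept
  | line :: rest, kept, used =>
    let add : Int := PySem.Str.len line + (if kept.isEmpty then (0 : Int) else 1)
    if used + add > mc ∧ kept ≠ [] then kept
    else fitA_loop mc rest (kept ++ [line]) (used + add)

def fit_lines_py (lines : List String) (max_chars : Int) (max_lines : Option Int) : String :=
  if lines = [] ∨ max_chars ≤ 0 then "" else
  let chosen := match max_lines with
    | none => lines                                   -- 'if max_lines' is falsy for None and 0
    | some m => if m = 0 then lines else PySem.List.slice lines (some (-m)) none
  let kept_rev := fitA_loop max_chars chosen.reverse [] 0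
  PySem.Str.join "\n" kept_rev.reverse

-- ===== PORT B =====
-- next((i for i, c in enumerate(costs) if c <= max_chars), default): the generator scan
def fitB_find (mc : Int) : List Int → Nat → Option Nat
  | [], _i => none
  | c :: cs, i => if c ≤ mc then some i else fitB_find mc cs (i + 1)

def fit_lines_py_alt (lines : List String) (max_chars : Int) (max_lines : Option Int) : String :=
  if lines = [] ∨ max_chars ≤ 0 then "" else
  let chosen := match max_lines with
    | none => lines
    | some m => if m = 0 then lines else PySem.List.slice lines (some (-m)) none
  let n := chosen.length
  if n = 0 then "" else
  -- the 'for line in reversed(chosen)' accumulation loop: state = (total, costs)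
  let acc := chosen.reverse.foldl
      (fun (st : Int × List Int) line =>
        (st.1 + PySem.Str.len line + 1, st.2 ++ [st.1 + PySem.Str.len line + 1]))
      ((-1 : Int), ([] : List Int))
  let costs := acc.2.reverse
  let start := (fitB_find max_chars costs 0).getD (n - 1)
  PySem.Str.join "\n" (PySem.List.slice chosen (some (start : Int)) none)

-- ===== PRECONDITION & SPEC =====
def Spec_fit_lines_py (lines : List String) (max_chars : Int) (max_lines : Option Int) (out : String) : Prop := out = fit_lines_py_alt lines max_chars max_lines
instance (lines : List String) (max_chars : Int) (max_lines : Option Int) (out : String) : Decidable (Spec_fit_lines_py lines max_chars max_lines out) := by unfold Spec_fit_lines_py; infer_instance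

-- ===== CLAIM (what is proved, stated in full; the proofs are below) =====
def Claim_equal_fit_lines_py : Prop := ∀ (lines : List String) (max_chars : Int) (max_lines : Option Int), Dom_fit_lines_py lines max_chars max_lines → Spec_fit_lines_py lines max_chars max_lines (fit_lines_py lines max_chars max_lines)

-- ===== LEMMAS AND PROOFS =====

-- cost of adding a line beyond the first: its length plus one separator
def wlen (s : String) : Int := PySem.Str.len s + 1

-- how many further lines A's loop keeps, starting from 'used' already spent
def cntFit (mc used : Int) : List String → Nat
  | [] => 0
  | l :: rest => if used + wlen l > mc then 0 else cntFit mc (used + wlen l) rest + 1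

-- the running totals B's accumulation loop appends, starting from t
def parts (t : Int) : List String → List Int
  | [] => []
  | l :: rest => (t + wlen l) :: parts (t + wlen l) rest

lemma wlen_pos (s : String) : 1 ≤ wlen s := by
  unfold wlen; rw [PySem.Str.len_eq]; omega

lemma cntFit_le_length (mc used : Int) (xs : List String) : cntFit mc used xs ≤ xs.length := by
  induction xs generalizing used with
  | nil => simp [cntFit]
  | cons l rest ih =>
    simp only [cntFit]
    split
    · simp
    · simpa using ih (used + wlen l)

lemma cntFit_pos_le (mc used : Int) (xs : List String) (h : cntFit mc used xs ≠ 0) :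
    used + 1 ≤ mc := by
  cases xs with
  | nil => simp [cntFit] at h
  | cons l rest =>
    simp only [cntFit] at h
    by_cases hc : used + wlen l > mc
    · simp [hc] at h
    · have := wlen_pos l; omega

lemma cntFit_zero_of_le (mc used : Int) (xs : List String) (h : mc ≤ used) :
    cntFit mc used xs = 0 := by
  cases xs with
  | nil => simp [cntFit]
  | cons l rest =>
    have := wlen_pos l
    simp only [cntFit]
    rw [if_pos (by omega)]

lemma fitA_loop_inv (mc : Int) (xs : List String) :
    ∀ kept used, kept ≠ [] →
      fitA_loop mc xs kept used = kept ++ xs.take (cntFit mc used xs) := by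
  induction xs with
  | nil => intro kept used _; simp [fitA_loop, cntFit]
  | cons l rest ih =>
    intro kept used hk
    have hE : kept.isEmpty = false := by simp [hk]
    simp only [fitA_loop, hE, Bool.false_eq_true, if_false]
    by_cases hc : mc < used + wlen l
    · rw [if_pos ⟨by unfold wlen at hc; omega, hk⟩]
      simp only [cntFit, if_pos hc]
      simp
    · rw [if_neg (by unfold wlen at hc; omega)]
      rw [ih (kept ++ [l]) (used + (PySem.Str.len l + 1)) (by simp)]
      simp only [cntFit, if_neg hc]
      have harg : used + (PySem.Str.len l + 1) = used + wlen l := by unfold wlen; ring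
      rw [harg]
      simp [List.take_succ_cons]

lemma fitA_loop_start (mc : Int) (l : String) (rest : List String) :
    fitA_loop mc (l :: rest) [] 0 =
      l :: rest.take (cntFit mc (PySem.Str.len l) rest) := by
  simp only [fitA_loop, List.isEmpty_nil, if_true]
  rw [if_neg (by simp)]
  simp only [List.nil_append]
  have h0 : (0 : Int) + (PySem.Str.len l + 0) = PySem.Str.len l := by ring
  rw [h0, fitA_loop_inv mc rest [l] _ (by simp)]
  simp

lemma parts_length (t : Int) (xs : List String) : (parts t xs).length = xs.length := by
  induction xs generalizing t with
  | nil => simp [parts]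
  | cons l rest ih => simp [parts, ih]

lemma fitB_fold (xs : List String) :
    ∀ t cs, (xs.foldl
      (fun (st : Int × List Int) line =>
        (st.1 + PySem.Str.len line + 1, st.2 ++ [st.1 + PySem.Str.len line + 1]))
      (t, cs)).2 = cs ++ parts t xs := by
  induction xs with
  | nil => intro t cs; simp [parts]
  | cons l rest ih =>
    intro t cs
    simp only [List.foldl_cons, parts]
    rw [ih]
    have harg : t + PySem.Str.len l + 1 = t + wlen l := by unfold wlen; ring
    rw [harg]
    simp

lemma fitB_find_append (mc : Int) (qs rs : List Int) :
    ∀ i, fitB_find mc (qs ++ rs) i =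
      ((fitB_find mc qs i).or (fitB_find mc rs (i + qs.length))) := by
  induction qs with
  | nil => intro i; simp [fitB_find]
  | cons c cs ih =>
    intro i
    simp only [List.cons_append, fitB_find]
    split
    · simp
    · rw [ih]
      simp only [List.length_cons]
      congr 2
      omega

lemma fitB_find_parts (mc : Int) (xs : List String) :
    ∀ t i, fitB_find mc (parts t xs).reverse i =
      (if cntFit mc t xs = 0 then none
       else some (i + (xs.length - cntFit mc t xs))) := by
  induction xs with
  | nil => intro t i; simp [parts, fitB_find, cntFit]
  | cons l rest ih =>
    intro t i
    simp only [parts, cntFit, List.reverse_cons]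
    rw [fitB_find_append]
    rw [ih]
    rw [List.length_reverse, parts_length]
    simp only [List.length_cons]
    by_cases h0 : cntFit mc (t + wlen l) rest = 0
    · by_cases hc : mc < t + wlen l
      · simp [h0, hc, fitB_find]
      · simp [h0, hc, fitB_find, not_lt.mp hc]
    · have hle := cntFit_pos_le mc (t + wlen l) rest h0
      have hlen := cntFit_le_length mc (t + wlen l) rest
      rw [if_neg h0]
      rw [if_neg (by omega : ¬ mc < t + wlen l)]
      simp only [Option.some_or, if_neg (by omega : ¬ cntFit mc (t + wlen l) rest + 1 = 0)]
      congr 1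
      omega

-- the common core: both ports agree once the guard and 'chosen' coincide
lemma core (mc : Int) (chosen : List String) :
    PySem.Str.join "\n" (fitA_loop mc chosen.reverse [] 0).reverse =
      (if chosen.length = 0 then "" else
        let acc := chosen.reverse.foldl
          (fun (st : Int × List Int) line =>
            (st.1 + PySem.Str.len line + 1, st.2 ++ [st.1 + PySem.Str.len line + 1]))
          ((-1 : Int), ([] : List Int))
        let costs := acc.2.reverse
        let start := (fitB_find mc costs 0).getD (chosen.length - 1)
        PySem.Str.join "\n" (PySem.List.slice chosen (some (start : Int)) none)) := by
  rcases List.eq_nil_or_concat chosen with rfl | ⟨ys, l, rfl⟩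
  · simp [fitA_loop]; decide
  · simp only [List.concat_eq_append]
    have hrev : (ys ++ [l]).reverse = l :: ys.reverse := by simp
    rw [if_neg (by simp)]
    simp only [hrev]
    rw [fitA_loop_start, fitB_fold, List.nil_append, fitB_find_parts]
    have h1 : (-1 : Int) + wlen l = PySem.Str.len l := by unfold wlen; ring
    simp only [cntFit, h1]
    set K0 := cntFit mc (PySem.Str.len l) ys.reverse with hK0
    have hK0le : K0 ≤ ys.length := by
      rw [hK0]; simpa using cntFit_le_length mc (PySem.Str.len l) ys.reverse
    by_cases hc : mc < PySem.Str.len l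
    · have hz : K0 = 0 := by
        rw [hK0]; exact cntFit_zero_of_le mc (PySem.Str.len l) ys.reverse (by omega)
      simp only [if_pos hc, hz, List.take_zero]
      rw [PySem.List.slice_from_natCast]
      simp
    · simp only [if_neg hc, if_neg (Nat.succ_ne_zero K0), Option.getD_some]
      rw [PySem.List.slice_from_natCast]
      congr 1
      have hidx : 0 + ((l :: ys.reverse).length - (K0 + 1)) = ys.length - K0 := by
        simp
      rw [hidx]
      rw [List.reverse_cons, List.reverse_take]
      rw [List.drop_append_of_le_length (by omega)]
      simp

-- ===== VERDICT (by name: the statement is the Claim_ definition above) =====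
theorem fit_lines_py_spec : Claim_equal_fit_lines_py := by
  intro lines mc ml _dom
  unfold Spec_fit_lines_py fit_lines_py fit_lines_py_alt
  split
  · rfl
  · exact core mc _
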